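-- pv_equiv track=rewrite | github.com/littlehill/i2cripper | i2crip-Parsers/ovd/OvdParser.py | filter_functions
-- ===== SOURCE A (Python) =====
-- def filter_functions(lines):
--     length = len(lines)
--     newLines = [] * length
--     i = 0
--     while i < length:
--         if "function" in lines[i]:
--             count = 0
--             while i < length:
--                 if(lines[i].count('{') > 0):
--                     break
--                 i += 1
--
--             while i < length:
--                 count += lines[i].count('{') - lines[i].count('}')
--                 if(count == 0):
--                     break
--                 i += 1
--         else:
--             newLines.append(lines[i])
--         i += 1
--
--     return newLines
-- ===== SOURCE B (Python) =====
-- def filter_functions(lines):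
--     out = []
--     in_block = False
--     seen_open = False
--     depth = 0
--     for line in lines:
--         if not in_block:
--             if "function" not in line:
--                 out.append(line)
--                 continue
--             in_block = True
--             seen_open = False
--             depth = 0
--         if not seen_open:
--             if line.count('{') == 0:
--                 continue
--             seen_open = True
--         depth += line.count('{') - line.count('}')
--         if depth == 0:
--             in_block = False
--     return out
-- ===== Notes on version B (the rewrite author's own statement) =====
-- stated objective: simpler
-- what changed: Replaced A's index-driven outer while with two nested inner while-loops (brace search and brace counting sharing the mutable index i) by a single for-loop state machine over the lines with flags in_block/seen_open and an integer depth.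
import Mathlib
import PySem

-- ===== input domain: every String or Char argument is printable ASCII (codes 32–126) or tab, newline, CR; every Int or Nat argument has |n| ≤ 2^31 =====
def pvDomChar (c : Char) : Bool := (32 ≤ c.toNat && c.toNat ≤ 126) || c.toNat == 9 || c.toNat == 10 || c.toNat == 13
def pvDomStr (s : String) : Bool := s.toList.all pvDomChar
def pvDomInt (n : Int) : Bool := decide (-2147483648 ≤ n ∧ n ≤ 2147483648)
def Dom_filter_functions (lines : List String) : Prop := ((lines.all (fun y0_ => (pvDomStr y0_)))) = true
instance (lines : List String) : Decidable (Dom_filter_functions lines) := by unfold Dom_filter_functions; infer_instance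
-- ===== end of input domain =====

-- B replaces A's index-driven nested while-loops by a single for-loop state machine
-- (flags in_block/seen_open plus a depth counter); objective: simpler, same cost.

-- ===== PORT A =====
-- small shared decreasing-measure facts (keep the well-founded definitions' embedded proof terms tiny)
theorem pvDecStep {length i : Int} (h : i < length) : (length - (i + 1)).toNat < (length - i).toNat := by
  omega

theorem pvDecJump {length i k : Int} (h : i < length) (hik : i ≤ k) :
    (length - (k + 1)).toNat < (length - i).toNat := by
  omega

-- inner `while i < length: if lines[i].count('{') > 0: break; i += 1`
def pvFindBrace (lines : List String) (length i : Int) : Int :=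
  if h : i < length then
    if PySem.Str.count (PySem.List.pyGetD lines i "") "{" > 0 then i
    else pvFindBrace lines length (i + 1)
  else i
termination_by (length - i).toNat
decreasing_by exact pvDecStep h

-- inner `while i < length: count += ...; if count == 0: break; i += 1` (returns the final i)
def pvBraceLoop (lines : List String) (length i count : Int) : Int :=
  if h : i < length then
    if count + (PySem.Str.count (PySem.List.pyGetD lines i "") "{" : Int)
         - (PySem.Str.count (PySem.List.pyGetD lines i "") "}" : Int) = 0 then i
    else pvBraceLoop lines length (i + 1)
      (count + (PySem.Str.count (PySem.List.pyGetD lines i "") "{" : Int)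
         - (PySem.Str.count (PySem.List.pyGetD lines i "") "}" : Int))
  else i
termination_by (length - i).toNat
decreasing_by exact pvDecStep h

-- the outer loop's `decreasing_by` cites these two facts
theorem pvFindBrace_ge (lines : List String) (length i : Int) : i ≤ pvFindBrace lines length i := by
  unfold pvFindBrace
  split
  · split
    · exact le_refl i
    · have := pvFindBrace_ge lines length (i + 1); omega
  · exact le_refl i
termination_by (length - i).toNat
decreasing_by omega

theorem pvBraceLoop_ge (lines : List String) (length i count : Int) : i ≤ pvBraceLoop lines length i count := by
  unfold pvBraceLoop
  split
  · split
    · exact le_refl i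
    · have := pvBraceLoop_ge lines length (i + 1)
        (count + (PySem.Str.count (PySem.List.pyGetD lines i "") "{" : Int)
           - (PySem.Str.count (PySem.List.pyGetD lines i "") "}" : Int))
      omega
  · exact le_refl i
termination_by (length - i).toNat
decreasing_by omega

-- outer `while i < length:` of A
def pvLoopA (lines : List String) (length i : Int) (newLines : List String) : List String :=
  if h : i < length then
    if PySem.Str.isIn "function" (PySem.List.pyGetD lines i "") then
      pvLoopA lines length (pvBraceLoop lines length (pvFindBrace lines length i) 0 + 1) newLines
    else
      pvLoopA lines length (i + 1) (newLines ++ [PySem.List.pyGetD lines i ""])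
  else newLines
termination_by (length - i).toNat
decreasing_by
  · exact pvDecJump h (le_trans (pvFindBrace_ge lines length i)
      (pvBraceLoop_ge lines length (pvFindBrace lines length i) 0))
  · exact pvDecStep h

def filter_functions (lines : List String) : List String :=
  pvLoopA lines (lines.length : Int) 0 []

-- ===== PORT B =====
-- the in-block body of B's loop (reached after `if not in_block:` fell through)
def pvInStep (line : String) (seenOpen : Bool) (depth : Int) (out : List String) :
    Bool × Bool × Int × List String :=
  if !seenOpen && (PySem.Str.count line "{" == 0) then (true, false, depth, out)
  else
    if depth + (PySem.Str.count line "{" : Int) - (PySem.Str.count line "}" : Int) = 0 then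
      (false, true, depth + (PySem.Str.count line "{" : Int) - (PySem.Str.count line "}" : Int), out)
    else
      (true, true, depth + (PySem.Str.count line "{" : Int) - (PySem.Str.count line "}" : Int), out)

-- one iteration of B's for-loop over the state (in_block, seen_open, depth, out)
def pvStepB (st : Bool × Bool × Int × List String) (line : String) : Bool × Bool × Int × List String :=
  match st with
  | (inBlock, seenOpen, depth, out) =>
    if inBlock then pvInStep line seenOpen depth out
    else if PySem.Str.isIn "function" line then pvInStep line false 0 out
    else (false, seenOpen, depth, out ++ [line])

def filter_functions_alt (lines : List String) : List String :=
  (lines.foldl pvStepB (false, false, 0, [])).2.2.2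

-- ===== PRECONDITION & SPEC =====
def Spec_filter_functions (lines : List String) (out : List String) : Prop := out = filter_functions_alt lines
instance (lines : List String) (out : List String) : Decidable (Spec_filter_functions lines out) := by unfold Spec_filter_functions; infer_instance

-- ===== CLAIM (what is proved, stated in full; the proofs are below) =====
def Claim_equal_filter_functions : Prop := ∀ (lines : List String), Dom_filter_functions lines → Spec_filter_functions lines (filter_functions lines)

-- ===== LEMMAS AND PROOFS =====

-- The three loop states of A matched against B's state machine, over the suffix lines.drop i.toNat:
-- (1) outside a block (B's stale seen_open/depth arbitrary), (2) scanning for the opening brace,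
-- (3) counting braces with running count c ≠ 0.
theorem pvCombo (lines : List String) (suffix : List String) :
    (∀ (i : Int) (acc : List String) (sO : Bool) (d : Int), 0 ≤ i → lines.drop i.toNat = suffix →
        pvLoopA lines (lines.length : Int) i acc = (suffix.foldl pvStepB (false, sO, d, acc)).2.2.2)
  ∧ (∀ (i : Int) (acc : List String), 0 ≤ i → lines.drop i.toNat = suffix →
        pvLoopA lines (lines.length : Int)
            (pvBraceLoop lines (lines.length : Int) (pvFindBrace lines (lines.length : Int) i) 0 + 1) acc
          = (suffix.foldl pvStepB (true, false, 0, acc)).2.2.2)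
  ∧ (∀ (i : Int) (acc : List String) (c : Int), c ≠ 0 → 0 ≤ i → lines.drop i.toNat = suffix →
        pvLoopA lines (lines.length : Int)
            (pvBraceLoop lines (lines.length : Int) i c + 1) acc
          = (suffix.foldl pvStepB (true, true, c, acc)).2.2.2) := by
  induction suffix with
  | nil =>
    refine ⟨?_, ?_, ?_⟩
    · intro i acc sO d h0 hd
      have hlen : lines.length ≤ i.toNat := List.drop_eq_nil_iff.mp hd
      rw [pvLoopA, dif_neg (by omega)]
      rfl
    · intro i acc h0 hd
      have hlen : lines.length ≤ i.toNat := List.drop_eq_nil_iff.mp hd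
      rw [pvFindBrace, dif_neg (by omega), pvBraceLoop, dif_neg (by omega),
        pvLoopA, dif_neg (by omega)]
      rfl
    · intro i acc c hc h0 hd
      have hlen : lines.length ≤ i.toNat := List.drop_eq_nil_iff.mp hd
      rw [pvBraceLoop, dif_neg (by omega), pvLoopA, dif_neg (by omega)]
      rfl
  | cons l rest ih =>
    obtain ⟨ihM, ihF, ihB⟩ := ih
    -- facts shared by the three parts
    have hfacts : ∀ (i : Int), 0 ≤ i → lines.drop i.toNat = l :: rest →
        i.toNat < lines.length ∧ PySem.List.pyGetD lines i "" = l ∧ lines.drop (i + 1).toNat = rest := by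
      intro i h0 hd
      have hlt : i.toNat < lines.length := by
        by_contra hc
        rw [List.drop_eq_nil_of_le (by omega)] at hd
        exact absurd hd (by simp)
      have hcons := List.drop_eq_getElem_cons hlt
      rw [hd] at hcons
      have hl : l = lines[i.toNat] := (List.cons.injEq _ _ _ _).mp hcons |>.1
      have hrest : rest = lines.drop (i.toNat + 1) := (List.cons.injEq _ _ _ _).mp hcons |>.2
      refine ⟨hlt, ?_, ?_⟩
      · rw [show i = ((i.toNat : Nat) : Int) by omega, PySem.List.pyGetD_natCast,
          List.getD_eq_getElem lines "" hlt, ← hl]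
      · have : (i + 1).toNat = i.toNat + 1 := by omega
        rw [this, ← hrest]
    -- (3) brace-counting state
    have hBrace : ∀ (i : Int) (acc : List String) (c : Int), c ≠ 0 → 0 ≤ i →
        lines.drop i.toNat = l :: rest →
        pvLoopA lines (lines.length : Int) (pvBraceLoop lines (lines.length : Int) i c + 1) acc
          = ((l :: rest).foldl pvStepB (true, true, c, acc)).2.2.2 := by
      intro i acc c hc h0 hd
      obtain ⟨hlt, hline, hrest⟩ := hfacts i h0 hd
      rw [pvBraceLoop, dif_pos (by omega), hline]
      rw [List.foldl_cons]
      by_cases he : c + (PySem.Str.count l "{" : Int) - (PySem.Str.count l "}" : Int) = 0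
      · rw [if_pos he]
        have he' : c + (PySem.Chars.count l.toList ['{'] : Int) - (PySem.Chars.count l.toList ['}'] : Int) = 0 := by
          simpa using he
        have hstep : pvStepB (true, true, c, acc) l = (false, true, 0, acc) := by
          simp [pvStepB, pvInStep, he']
        rw [hstep]
        exact ihM (i + 1) acc true 0 (by omega) hrest
      · rw [if_neg he]
        have he' : ¬ c + (PySem.Chars.count l.toList ['{'] : Int) - (PySem.Chars.count l.toList ['}'] : Int) = 0 := by
          simpa using he
        have hstep : pvStepB (true, true, c, acc) l
            = (true, true, c + (PySem.Str.count l "{" : Int) - (PySem.Str.count l "}" : Int), acc) := by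
          simp [pvStepB, pvInStep, he']
        rw [hstep]
        exact ihB (i + 1) acc _ he (by omega) hrest
    -- (2) scanning-for-brace state
    have hFind : ∀ (i : Int) (acc : List String), 0 ≤ i → lines.drop i.toNat = l :: rest →
        pvLoopA lines (lines.length : Int)
            (pvBraceLoop lines (lines.length : Int) (pvFindBrace lines (lines.length : Int) i) 0 + 1) acc
          = ((l :: rest).foldl pvStepB (true, false, 0, acc)).2.2.2 := by
      intro i acc h0 hd
      obtain ⟨hlt, hline, hrest⟩ := hfacts i h0 hd
      rw [pvFindBrace, dif_pos (by omega), hline]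
      rw [List.foldl_cons]
      by_cases ho : PySem.Str.count l "{" > 0
      · rw [if_pos ho]
        rw [pvBraceLoop, dif_pos (by omega), hline]
        by_cases he : (0 : Int) + (PySem.Str.count l "{" : Int) - (PySem.Str.count l "}" : Int) = 0
        · rw [if_pos he]
          have ho' : ¬ PySem.Chars.count l.toList ['{'] = 0 := by
            have := ho; simp at this; omega
          have he' : (PySem.Chars.count l.toList ['{'] : Int) - (PySem.Chars.count l.toList ['}'] : Int) = 0 := by
            have := he; simp at this; omega
          have hstep : pvStepB (true, false, 0, acc) l = (false, true, 0, acc) := by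
            simp [pvStepB, pvInStep, ho', he']
          rw [hstep]
          exact ihM (i + 1) acc true 0 (by omega) hrest
        · rw [if_neg he]
          have ho' : ¬ PySem.Chars.count l.toList ['{'] = 0 := by
            have := ho; simp at this; omega
          have he' : ¬ (PySem.Chars.count l.toList ['{'] : Int) - (PySem.Chars.count l.toList ['}'] : Int) = 0 := by
            have := he; simp at this; omega
          have hstep : pvStepB (true, false, 0, acc) l
              = (true, true, (0 : Int) + (PySem.Str.count l "{" : Int) - (PySem.Str.count l "}" : Int), acc) := by
            simp [pvStepB, pvInStep, ho', he']
          rw [hstep]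
          exact ihB (i + 1) acc _ he (by omega) hrest
      · rw [if_neg ho]
        have hz : PySem.Chars.count l.toList ['{'] = 0 := by
          have : PySem.Str.count l "{" = 0 := by omega
          simpa using this
        have hstep : pvStepB (true, false, 0, acc) l = (true, false, 0, acc) := by
          simp [pvStepB, pvInStep, hz]
        rw [hstep]
        exact ihF (i + 1) acc (by omega) hrest
    -- (1) outside-block state
    have hMain : ∀ (i : Int) (acc : List String) (sO : Bool) (d : Int), 0 ≤ i →
        lines.drop i.toNat = l :: rest →
        pvLoopA lines (lines.length : Int) i acc
          = ((l :: rest).foldl pvStepB (false, sO, d, acc)).2.2.2 := by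
      intro i acc sO d h0 hd
      obtain ⟨hlt, hline, hrest⟩ := hfacts i h0 hd
      rw [pvLoopA, dif_pos (by omega), hline]
      by_cases hfn : PySem.Str.isIn "function" l
      · rw [if_pos hfn]
        have hsw : ((l :: rest).foldl pvStepB (false, sO, d, acc))
            = ((l :: rest).foldl pvStepB (true, false, 0, acc)) := by
          rw [List.foldl_cons, List.foldl_cons]
          have : pvStepB (false, sO, d, acc) l = pvStepB (true, false, 0, acc) l := by
            simp only [pvStepB, hfn, Bool.false_eq_true, if_false, if_true]
          rw [this]
        rw [hsw]
        exact hFind i acc h0 hd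
      · rw [if_neg hfn]
        rw [List.foldl_cons]
        have hstep : pvStepB (false, sO, d, acc) l = (false, sO, d, acc ++ [l]) := by
          simp only [pvStepB, Bool.false_eq_true, if_false, if_neg hfn]
        rw [hstep]
        exact ihM (i + 1) (acc ++ [l]) sO d (by omega) hrest
    exact ⟨hMain, hFind, hBrace⟩

-- ===== VERDICT (by name: the statement is the Claim_ definition above) =====
theorem filter_functions_spec : Claim_equal_filter_functions := by
  intro lines _
  unfold Spec_filter_functions filter_functions filter_functions_alt
  exact (pvCombo lines lines).1 0 [] false 0 le_rfl rfl
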